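-- pv_equiv track=rewrite | github.com/NRG-Wardog/firstYearMagshimim | Networking/newhilt.py | get_password
-- ===== SOURCE A (Python) =====
-- def get_password(target_ascii_sum):
--     password = []
--     current_sum = 0
--
--     while current_sum + ord('z') <= target_ascii_sum - ord('0'):
--         password.append('z')
--         current_sum += ord('z')
--
--         if current_sum + ord('0') <= target_ascii_sum:
--             password.append('0')
--             current_sum += ord('0')
--         else:
--             break
--
--     if current_sum < target_ascii_sum:
--         password.append(chr(target_ascii_sum - current_sum))
--
--     return ''.join(password)
-- ===== SOURCE B (Python) =====
-- def get_password(target_ascii_sum):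
--     k = max(0, target_ascii_sum // 170)  # 170 = ord('z') + ord('0')
--     remainder = target_ascii_sum - 170 * k
--     return 'z0' * k + (chr(remainder) if remainder > 0 else '')
-- ===== Notes on version B (the rewrite author's own statement) =====
-- stated objective: simpler
-- what changed: Replaces the accumulating while-loop with a closed form: the number of 'z0' pairs is max(0, target//170) by integer division, the prefix is built by string repetition, and the single remainder character is appended when positive.
import Mathlib
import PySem

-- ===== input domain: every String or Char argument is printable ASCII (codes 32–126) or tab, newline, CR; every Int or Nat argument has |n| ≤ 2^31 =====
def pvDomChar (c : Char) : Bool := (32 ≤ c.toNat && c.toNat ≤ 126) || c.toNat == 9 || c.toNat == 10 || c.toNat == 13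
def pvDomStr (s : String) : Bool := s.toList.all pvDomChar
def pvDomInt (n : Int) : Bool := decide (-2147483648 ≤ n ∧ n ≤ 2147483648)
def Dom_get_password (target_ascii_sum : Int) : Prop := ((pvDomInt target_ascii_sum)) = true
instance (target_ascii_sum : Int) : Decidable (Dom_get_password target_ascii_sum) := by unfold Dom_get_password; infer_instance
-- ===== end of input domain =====

-- B replaces A's accumulating while-loop by a closed form (pair count via integer division); objective: simpler.

-- ===== PORT A =====
-- the while-loop of A: state (password, current_sum); ord('z')=122, ord('0')=48
def get_password_loopA (T : Int) (pw : List Char) (cs : Int) : List Char × Int :=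
  if cs + 122 ≤ T - 48 then
    let pw2 := pw ++ ['z']
    let cs2 := cs + 122
    if cs2 + 48 ≤ T then
      get_password_loopA T (pw2 ++ ['0']) (cs2 + 48)
    else
      (pw2, cs2)  -- break
  else (pw, cs)
termination_by (T - cs).toNat
decreasing_by omega

-- A: run the while loop, then append chr(T - cs) if cs < T (Char.ofNat is exact for the 0 < T - cs < 170 values reached)
def get_password (target_ascii_sum : Int) : String :=
  let r := get_password_loopA target_ascii_sum [] 0
  let pw := if r.2 < target_ascii_sum then r.1 ++ [Char.ofNat (target_ascii_sum - r.2).toNat] else r.1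
  String.mk pw

-- ===== PORT B =====
def get_password_alt (target_ascii_sum : Int) : String :=
  let k := max 0 (PySem.Int.floordiv target_ascii_sum 170)
  let remainder := target_ascii_sum - 170 * k
  String.mk (List.flatten (List.replicate k.toNat ['z', '0']) ++
    (if remainder > 0 then [Char.ofNat remainder.toNat] else []))

-- ===== PRECONDITION & SPEC =====
def Spec_get_password (target_ascii_sum : Int) (out : String) : Prop := out = get_password_alt target_ascii_sum
instance (target_ascii_sum : Int) (out : String) : Decidable (Spec_get_password target_ascii_sum out) := by unfold Spec_get_password; infer_instance

-- ===== CLAIM (what is proved, stated in full; the proofs are below) =====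
def Claim_equal_get_password : Prop := ∀ (target_ascii_sum : Int), Dom_get_password target_ascii_sum → Spec_get_password target_ascii_sum (get_password target_ascii_sum)

-- ===== LEMMAS AND PROOFS =====

theorem get_password_loopA_eq (T : Int) (pw : List Char) (cs : Int) :
    get_password_loopA T pw cs =
      (pw ++ List.flatten (List.replicate (max 0 (PySem.Int.floordiv (T - cs) 170)).toNat ['z', '0']),
       cs + 170 * max 0 (PySem.Int.floordiv (T - cs) 170)) := by
  rw [PySem.Int.floordiv_eq_ediv_of_pos (by norm_num)]
  fun_induction get_password_loopA T pw cs with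
  | case1 pw cs h pw2 cs2 h2 ih =>
      rw [ih]
      have hn : (max 0 ((T - cs) / 170)).toNat = (max 0 ((T - (cs + 122 + 48)) / 170)).toNat + 1 := by
        omega
      have hm : (170 : Int) * max 0 ((T - cs) / 170) = 170 * max 0 ((T - (cs + 122 + 48)) / 170) + 170 := by
        omega
      simp only [pw2, cs2, hn, hm, List.replicate_succ, List.flatten_cons]
      refine Prod.ext ?_ ?_
      · simp
      · simp; omega
  | case2 pw cs h pw2 cs2 h2 =>
      exact absurd (by omega : cs2 + 48 ≤ T) h2
  | case3 pw cs h =>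
      have hz : max 0 ((T - cs) / 170) = 0 := by omega
      simp [hz]

theorem get_password_spec' (T : Int) : get_password T = get_password_alt T := by
  have hfd : PySem.Int.floordiv T 170 = T / 170 :=
    PySem.Int.floordiv_eq_ediv_of_pos (by norm_num)
  unfold get_password get_password_alt
  rw [get_password_loopA_eq]
  simp only [hfd, sub_zero, List.nil_append, zero_add]
  split_ifs with h1 h2 h2
  · simp
  · omega
  · omega
  · simp

-- ===== VERDICT (by name: the statement is the Claim_ definition above) =====
theorem get_password_spec : Claim_equal_get_password := by
  intro T _
  exact get_password_spec' T
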